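-- pv_equiv track=rewrite | github.com/SoftwareProcess/2048-peixiongau | Tiles2048/shift.py | _change_pos
-- ===== SOURCE A (Python) =====
-- def _change_pos(grid, i, j, dirc):
--     if dirc == 'right' or dirc == 'down':
--         if j == 0 or grid[i][j-1] == 0:
--             return grid
--         if grid[i][j] == 0:
--             grid[i][j] = grid[i][j-1]
--             grid[i][j-1] = 0
--             grid = _change_pos(grid, i, j-1, dirc)
--
--     else:
--         if j == 3 or grid[i][j+1] == 0:
--             return grid
--         if grid[i][j] == 0:
--             grid[i][j] = grid[i][j+1]
--             grid[i][j+1] = 0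
--             grid = _change_pos(grid, i, j+1, dirc)
--
--     return grid
-- ===== SOURCE B (Python) =====
-- def _change_pos(grid, i, j, dirc):
--     right = dirc == 'right' or dirc == 'down'
--     step = -1 if right else 1
--     edge = 0 if right else 3
--     while j != edge and grid[i][j + step] != 0 and grid[i][j] == 0:
--         grid[i][j] = grid[i][j + step]
--         grid[i][j + step] = 0
--         j += step
--     return grid
-- ===== Notes on version B (the rewrite author's own statement) =====
-- stated objective: idiomatic
-- what changed: Replaces A's tail recursion (re-dispatching on the direction at every call) with a single flat while loop driven by a step/edge pair computed once from the direction, with the guard in the same order (edge, neighbour nonzero, current cell zero).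
-- outside the precondition, e.g. on _change_pos([[2, 0]], 0, 1, 'left'): A raises IndexError, B raises IndexError; on _change_pos([[0, 2, 0, 0]], 0, -2, 'right'): A returns [[0, 0, 2, 0]], B returns [[0, 0, 2, 0]]
import Mathlib
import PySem

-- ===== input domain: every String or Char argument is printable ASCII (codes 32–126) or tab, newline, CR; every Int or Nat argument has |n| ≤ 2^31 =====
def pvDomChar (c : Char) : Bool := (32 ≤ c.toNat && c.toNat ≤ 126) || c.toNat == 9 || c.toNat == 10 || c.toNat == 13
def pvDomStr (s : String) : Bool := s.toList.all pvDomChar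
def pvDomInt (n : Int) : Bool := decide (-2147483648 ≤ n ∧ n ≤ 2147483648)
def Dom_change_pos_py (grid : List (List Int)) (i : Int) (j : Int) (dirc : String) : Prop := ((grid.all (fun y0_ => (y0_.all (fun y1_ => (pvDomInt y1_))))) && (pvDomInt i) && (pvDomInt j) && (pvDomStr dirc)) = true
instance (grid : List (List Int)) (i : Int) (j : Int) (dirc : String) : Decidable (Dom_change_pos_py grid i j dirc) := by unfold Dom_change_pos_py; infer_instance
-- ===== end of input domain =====

-- B replaces A's tail recursion along the row by one flat while loop driven by a step/edge pair
-- derived once from the direction (objective: idiomatic/simpler); both mutate the grid in place in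
-- Python, and the equivalence proved here is about the returned grid (which is that same object).

-- helper lemmas the ports' own termination proofs cite by name (so they stay above the ports)
theorem pv_getD_nil_int (k : Int) : PySem.List.pyGetD ([] : List Int) k 0 = 0 := by
  simp only [PySem.List.pyGetD, PySem.List.pyGet?, PySem.List.pyIdx?, List.length_nil]
  split_ifs <;> simp

theorem pv_getD_ne_zero_inrange (xs : List Int) (i : Int)
    (h : PySem.List.pyGetD xs i 0 ≠ 0) : PySem.Raise.InRange xs.length i := by
  by_contra hc
  apply h
  simp only [PySem.List.pyGetD, PySem.List.pyGet?, PySem.List.pyIdx?, PySem.Raise.InRange] at *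
  split_ifs with hp hq hq <;> simp <;> omega

theorem pv_row_ne_nil_inrange (g : List (List Int)) (i : Int)
    (h : PySem.List.pyGetD g i ([] : List Int) ≠ []) : PySem.Raise.InRange g.length i := by
  by_contra hc
  apply h
  simp only [PySem.List.pyGetD, PySem.List.pyGet?, PySem.List.pyIdx?, PySem.Raise.InRange] at *
  split_ifs with hp hq hq <;> simp <;> omega

theorem pv_getD_setD_self (g : List (List Int)) (i : Int) (r : List Int)
    (h : PySem.Raise.InRange g.length i) :
    PySem.List.pyGetD (PySem.List.pySetD g i r) i [] = r := by
  obtain ⟨h1, h2⟩ := h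
  simp only [PySem.List.pyGetD, PySem.List.pyGet?, PySem.List.pyIdx?, PySem.List.length_pySetD]
  simp only [PySem.List.pySetD, PySem.List.pySet?, PySem.List.pyIdx?]
  split_ifs with hp
  · simp [List.getElem?_set_self (by omega : i.toNat < g.length)]
  · simp [List.getElem?_set_self (by omega : g.length - (-i).toNat < g.length)]

-- ===== PORT A =====
-- literal port of A's recursion; pyGetD/pySetD with Python's negative-index rule
-- (default [] / 0 is only read where Python would raise IndexError — outside Pre_).
def change_pos_py (grid : List (List Int)) (i : Int) (j : Int) (dirc : String) : List (List Int) :=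
  if dirc = "right" ∨ dirc = "down" then
    if j = 0 ∨ PySem.List.pyGetD (PySem.List.pyGetD grid i []) (j - 1) 0 = 0 then grid
    else if PySem.List.pyGetD (PySem.List.pyGetD grid i []) j 0 = 0 then
      let row := PySem.List.pyGetD grid i []
      let row1 := PySem.List.pySetD row j (PySem.List.pyGetD row (j - 1) 0)
      let row2 := PySem.List.pySetD row1 (j - 1) 0
      change_pos_py (PySem.List.pySetD grid i row2) i (j - 1) dirc
    else grid
  else
    if j = 3 ∨ PySem.List.pyGetD (PySem.List.pyGetD grid i []) (j + 1) 0 = 0 then grid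
    else if PySem.List.pyGetD (PySem.List.pyGetD grid i []) j 0 = 0 then
      let row := PySem.List.pyGetD grid i []
      let row1 := PySem.List.pySetD row j (PySem.List.pyGetD row (j + 1) 0)
      let row2 := PySem.List.pySetD row1 (j + 1) 0
      change_pos_py (PySem.List.pySetD grid i row2) i (j + 1) dirc
    else grid
  termination_by (if dirc = "right" ∨ dirc = "down" then j + (PySem.List.pyGetD grid i []).length + 1
                  else (PySem.List.pyGetD grid i []).length - j).toNat
  decreasing_by
  · rename_i hd hstop _
    obtain ⟨_hj0, hv⟩ := not_or.mp hstop
    have hir : PySem.Raise.InRange (PySem.List.pyGetD grid i []).length (j - 1) :=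
      pv_getD_ne_zero_inrange _ _ hv
    have hrow : PySem.List.pyGetD grid i [] ≠ [] := by
      intro hnil; apply hv; rw [hnil]; exact pv_getD_nil_int _
    have hgi : PySem.Raise.InRange grid.length i := pv_row_ne_nil_inrange _ _ hrow
    rw [pv_getD_setD_self _ _ _ hgi]
    simp only [PySem.List.length_pySetD, if_pos hd]
    obtain ⟨ha, _hb⟩ := hir
    omega
  · rename_i hd hstop _
    obtain ⟨_hj3, hv⟩ := not_or.mp hstop
    have hir : PySem.Raise.InRange (PySem.List.pyGetD grid i []).length (j + 1) :=
      pv_getD_ne_zero_inrange _ _ hv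
    have hrow : PySem.List.pyGetD grid i [] ≠ [] := by
      intro hnil; apply hv; rw [hnil]; exact pv_getD_nil_int _
    have hgi : PySem.Raise.InRange grid.length i := pv_row_ne_nil_inrange _ _ hrow
    rw [pv_getD_setD_self _ _ _ hgi]
    simp only [PySem.List.length_pySetD, if_neg hd]
    obtain ⟨_ha, hb⟩ := hir
    omega

-- ===== PORT B =====
-- the while loop of Source B: guard 'j != edge and grid[i][j+step] != 0 and grid[i][j] == 0',
-- body does the in-place move and j += step; 'right' is the flag Source B computes once.
def pvShiftLoop (grid : List (List Int)) (i : Int) (j : Int) (right : Bool) : List (List Int) :=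
  if j ≠ (if right then 0 else 3) ∧
      PySem.List.pyGetD (PySem.List.pyGetD grid i []) (j + (if right then -1 else 1)) 0 ≠ 0 ∧
      PySem.List.pyGetD (PySem.List.pyGetD grid i []) j 0 = 0 then
    let row := PySem.List.pyGetD grid i []
    let row1 := PySem.List.pySetD row j (PySem.List.pyGetD row (j + (if right then -1 else 1)) 0)
    let row2 := PySem.List.pySetD row1 (j + (if right then -1 else 1)) 0
    pvShiftLoop (PySem.List.pySetD grid i row2) i (j + (if right then -1 else 1)) right
  else grid
  termination_by (if right then j + (PySem.List.pyGetD grid i []).length + 1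
                  else (PySem.List.pyGetD grid i []).length - j).toNat
  decreasing_by
  · rename_i hcond
    obtain ⟨hje, hv, _hcur⟩ := hcond
    have hir := pv_getD_ne_zero_inrange _ _ hv
    have hrow : PySem.List.pyGetD grid i [] ≠ [] := by
      intro hnil; apply hv; rw [hnil]; exact pv_getD_nil_int _
    have hgi : PySem.Raise.InRange grid.length i := pv_row_ne_nil_inrange _ _ hrow
    rw [pv_getD_setD_self _ _ _ hgi]
    simp only [PySem.List.length_pySetD]
    obtain ⟨ha, hb⟩ := hir
    cases right <;> simp_all <;> omega

def change_pos_py_alt (grid : List (List Int)) (i : Int) (j : Int) (dirc : String) : List (List Int) :=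
  pvShiftLoop grid i j (dirc == "right" || dirc == "down")

-- ===== PRECONDITION & SPEC =====
-- Pre_ excludes the inputs on which A raises IndexError (an index outside Python's range for the
-- row or the shifted cell) together with the negative start positions whose walk raises or stops
-- depending on the cell values; on the few such excluded inputs where A happens to stop and
-- return, B runs the very same walk and returns the same grid.
def Pre_change_pos_py (grid : List (List Int)) (i : Int) (j : Int) (dirc : String) : Prop :=
  if dirc = "right" ∨ dirc = "down" then
    j = 0 ∨ (PySem.Raise.InRange grid.length i ∧
      PySem.Raise.InRange (PySem.List.pyGetD grid i []).length (j - 1) ∧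
      (PySem.List.pyGetD (PySem.List.pyGetD grid i []) (j - 1) 0 = 0 ∨
        (PySem.Raise.InRange (PySem.List.pyGetD grid i []).length j ∧
          (0 ≤ j ∨ PySem.List.pyGetD (PySem.List.pyGetD grid i []) j 0 ≠ 0))))
  else
    j = 3 ∨ (PySem.Raise.InRange grid.length i ∧
      PySem.Raise.InRange (PySem.List.pyGetD grid i []).length (j + 1) ∧
      (PySem.List.pyGetD (PySem.List.pyGetD grid i []) (j + 1) 0 = 0 ∨
        (PySem.Raise.InRange (PySem.List.pyGetD grid i []).length j ∧
          ((j < 3 ∧ 4 ≤ (PySem.List.pyGetD grid i []).length) ∨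
            PySem.List.pyGetD (PySem.List.pyGetD grid i []) j 0 ≠ 0))))
instance (grid : List (List Int)) (i : Int) (j : Int) (dirc : String) : Decidable (Pre_change_pos_py grid i j dirc) := by unfold Pre_change_pos_py; infer_instance

def pvWitness_change_pos_py : List (List Int) × Int × Int × String :=
  ([[2, 0, 0, 0], [0, 0, 0, 0], [0, 0, 0, 0], [0, 0, 0, 0]], 0, 3, "right")

def Spec_change_pos_py (grid : List (List Int)) (i : Int) (j : Int) (dirc : String) (out : List (List Int)) : Prop := out = change_pos_py_alt grid i j dirc
instance (grid : List (List Int)) (i : Int) (j : Int) (dirc : String) (out : List (List Int)) : Decidable (Spec_change_pos_py grid i j dirc out) := by unfold Spec_change_pos_py; infer_instance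

-- ===== CLAIM (what is proved, stated in full; the proofs are below) =====
def Claim_equal_change_pos_py : Prop := ∀ (grid : List (List Int)) (i : Int) (j : Int) (dirc : String), Dom_change_pos_py grid i j dirc → Pre_change_pos_py grid i j dirc → Spec_change_pos_py grid i j dirc (change_pos_py grid i j dirc)

-- ===== LEMMAS AND PROOFS =====

-- the two ports agree on every input (Pre_ is only needed for faithfulness to Python)
theorem pv_ports_eq (grid : List (List Int)) (i : Int) (j : Int) (dirc : String) :
    change_pos_py grid i j dirc = pvShiftLoop grid i j (dirc == "right" || dirc == "down") := by
  have e1 : ∀ x : Int, x + -1 = x - 1 := fun x => by ring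
  fun_induction change_pos_py grid i j dirc
  · rename_i g jj hd hstop
    have hR : (dirc == "right" || dirc == "down") = true := by rcases hd with h | h <;> simp [h]
    rw [hR, pvShiftLoop]
    rcases hstop with h0 | hv
    · simp [h0]
    · simp [hv, e1]
  · rename_i g jj hd hstop hcur row row1 row2 ih1
    have hR : (dirc == "right" || dirc == "down") = true := by rcases hd with h | h <;> simp [h]
    obtain ⟨hj0, hv⟩ := not_or.mp hstop
    rw [ih1, hR]
    conv_rhs => rw [pvShiftLoop]
    rw [if_pos]
    · rfl
    · refine ⟨by simpa using hj0, ?_, hcur⟩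
      simpa [e1] using hv
  · rename_i g jj hd hstop hcur
    have hR : (dirc == "right" || dirc == "down") = true := by rcases hd with h | h <;> simp [h]
    rw [hR, pvShiftLoop]
    simp [hcur]
  · rename_i g jj hd hstop
    have hR : (dirc == "right" || dirc == "down") = false := by
      simp only [Bool.or_eq_false_iff, beq_eq_false_iff_ne]
      exact ⟨fun h => hd (Or.inl h), fun h => hd (Or.inr h)⟩
    rw [hR, pvShiftLoop]
    rcases hstop with h3 | hv
    · simp [h3]
    · simp [hv]
  · rename_i g jj hd hstop hcur row row1 row2 ih1
    have hR : (dirc == "right" || dirc == "down") = false := by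
      simp only [Bool.or_eq_false_iff, beq_eq_false_iff_ne]
      exact ⟨fun h => hd (Or.inl h), fun h => hd (Or.inr h)⟩
    obtain ⟨hj3, hv⟩ := not_or.mp hstop
    rw [ih1, hR]
    conv_rhs => rw [pvShiftLoop]
    rw [if_pos]
    · rfl
    · refine ⟨by simpa using hj3, ?_, hcur⟩
      simpa using hv
  · rename_i g jj hd hstop hcur
    have hR : (dirc == "right" || dirc == "down") = false := by
      simp only [Bool.or_eq_false_iff, beq_eq_false_iff_ne]
      exact ⟨fun h => hd (Or.inl h), fun h => hd (Or.inr h)⟩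
    rw [hR, pvShiftLoop]
    simp [hcur]

-- ===== VERDICT (by name: the statement is the Claim_ definition above) =====
theorem change_pos_py_spec : Claim_equal_change_pos_py := by
  intro grid i j dirc _ _
  unfold Spec_change_pos_py change_pos_py_alt
  exact pv_ports_eq grid i j dirc
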